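-- pv_equiv track=rewrite | github.com/Kota28/AtCoder | ABC133_B.py | check
-- ===== SOURCE A (Python) =====
-- def distance(a,b):
--     d=0
--     for i in range(len(a)):
--         d+=abs(a[i]-b[i])**2
--     return d
--
-- def check(a,b):
--     f=0
--     for i in range(1000):
--         if distance(a,b)==i**2:
--             f+=1
--             break
--         else:
--             f=f
--     if f>0:
--         return True
--     else:
--         return False
-- ===== SOURCE B (Python) =====
-- def check(a, b):
--     d = 0
--     for x, y in zip(a, b):
--         d += (x - y) ** 2
--     lo, hi = 0, 1000
--     while lo < hi:
--         mid = (lo + hi) // 2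
--         if mid * mid < d:
--             lo = mid + 1
--         else:
--             hi = mid
--     return lo < 1000 and lo * lo == d
-- ===== Notes on version B (the rewrite author's own statement) =====
-- stated objective: faster
-- what changed: B computes the squared distance once and binary-searches for its integer square root in [0,1000) instead of recomputing the whole distance up to 1000 times while scanning all candidate roots linearly.
import Mathlib
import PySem

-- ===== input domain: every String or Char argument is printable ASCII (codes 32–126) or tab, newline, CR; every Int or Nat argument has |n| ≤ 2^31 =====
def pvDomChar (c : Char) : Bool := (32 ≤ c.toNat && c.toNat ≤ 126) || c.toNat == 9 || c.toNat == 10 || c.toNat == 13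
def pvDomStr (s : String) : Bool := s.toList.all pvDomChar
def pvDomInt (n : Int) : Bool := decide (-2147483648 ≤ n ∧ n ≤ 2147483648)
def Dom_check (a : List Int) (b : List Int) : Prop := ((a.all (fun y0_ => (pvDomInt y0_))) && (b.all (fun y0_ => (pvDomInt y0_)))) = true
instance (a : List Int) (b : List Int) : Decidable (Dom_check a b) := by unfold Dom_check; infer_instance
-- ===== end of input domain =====

-- B computes the squared distance once and binary-searches the root in [0,1000) instead of
-- rescanning 1000 candidate roots, recomputing the whole distance at each; return values agree on Pre_.

-- ===== PORT A =====
-- distance(a,b): none exactly where Python's b[i] (or a[i]) raises IndexError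
def distance (a : List Int) (b : List Int) : Option Int :=
  (PySem.List.pyRange 0 (a.length : Int) 1).foldl
    (fun d? i =>
      d?.bind fun d =>
        (PySem.List.pyGet? a i).bind fun x =>
          (PySem.List.pyGet? b i).bind fun y =>
            some (d + |x - y| ^ 2))
    (some 0)

-- the 'for i in range(1000): if distance(a,b)==i**2: f+=1; break' loop (distance re-evaluated each pass)
def checkLoop (a : List Int) (b : List Int) : List Int → Int → Int
  | [], f => f
  | i :: rest, f => if distance a b = some (i ^ 2) then f + 1 else checkLoop a b rest f

def check (a : List Int) (b : List Int) : Bool :=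
  let f := checkLoop a b (PySem.List.pyRange 0 1000 1) 0
  if f > 0 then true else false

-- ===== PORT B =====
-- the 'while lo < hi' loop; fuel (hi-lo).toNat only makes the recursion structural (each pass shrinks hi-lo)
def bsearchFuel : Nat → Int → Int → Int → Int
  | 0, _, lo, _ => lo
  | fuel + 1, d, lo, hi =>
    if lo < hi then
      let mid := PySem.Int.floordiv (lo + hi) 2
      if mid * mid < d then bsearchFuel fuel d (mid + 1) hi else bsearchFuel fuel d lo mid
    else lo

def check_alt (a : List Int) (b : List Int) : Bool :=
  let d := (a.zip b).foldl (fun s p => s + (p.1 - p.2) ^ 2) 0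
  let lo := bsearchFuel 1000 d 0 1000
  decide (lo < 1000 ∧ lo * lo = d)

-- ===== PRECONDITION & SPEC =====
-- Pre_ excludes exactly the inputs where Python A raises IndexError (b shorter than a)
def Pre_check (a : List Int) (b : List Int) : Prop := a.length ≤ b.length
instance (a : List Int) (b : List Int) : Decidable (Pre_check a b) := by unfold Pre_check; infer_instance
def pvWitness_check : List Int × List Int := ([3, -1], [0, 2])

def Spec_check (a : List Int) (b : List Int) (out : Bool) : Prop := out = check_alt a b
instance (a : List Int) (b : List Int) (out : Bool) : Decidable (Spec_check a b out) := by unfold Spec_check; infer_instance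

-- ===== CLAIM (what is proved, stated in full; the proofs are below) =====
def Claim_equal_check : Prop := ∀ (a : List Int) (b : List Int), Dom_check a b → Pre_check a b → Spec_check a b (check a b)

-- ===== LEMMAS AND PROOFS =====

-- the index loop of distance, started at any offset j, is the zip-fold of the dropped suffixes
theorem distAux (a b : List Int) (hlen : a.length ≤ b.length) :
    ∀ (n j : Nat) (acc : Int), a.length - j ≤ n → j ≤ a.length →
      (PySem.List.pyRange (j : Int) (a.length : Int) 1).foldl
          (fun d? i =>
            d?.bind fun d =>
              (PySem.List.pyGet? a i).bind fun x =>
                (PySem.List.pyGet? b i).bind fun y =>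
                  some (d + |x - y| ^ 2))
          (some acc)
        = some (((a.drop j).zip (b.drop j)).foldl (fun s p => s + (p.1 - p.2) ^ 2) acc) := by
  intro n
  induction n with
  | zero =>
    intro j acc hn hj
    have hj' : j = a.length := by omega
    subst hj'
    rw [PySem.List.pyRange_one_eq_nil (by omega)]
    simp [List.drop_length]
  | succ n ih =>
    intro j acc hn hj
    by_cases hlt : j < a.length
    · have hb : j < b.length := by omega
      rw [PySem.List.pyRange_one_cons (by exact_mod_cast hlt)]
      have h1 : PySem.List.pyGet? a (j : Int) = some a[j] := by
        simp [PySem.List.pyGet?_natCast, List.getElem?_eq_getElem hlt]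
      have h2 : PySem.List.pyGet? b (j : Int) = some b[j] := by
        simp [PySem.List.pyGet?_natCast, List.getElem?_eq_getElem hb]
      simp only [List.foldl_cons, Option.bind_some, h1, h2]
      have hcast : (j : Int) + 1 = ((j + 1 : Nat) : Int) := by push_cast; ring
      rw [hcast, ih (j + 1) (acc + |a[j] - b[j]| ^ 2) (by omega) (by omega)]
      conv_rhs => rw [List.drop_eq_getElem_cons hlt, List.drop_eq_getElem_cons hb]
      rw [List.zip_cons_cons, List.foldl_cons]
      simp [sq_abs]
    · have hj' : j = a.length := by omega
      subst hj'
      rw [PySem.List.pyRange_one_eq_nil (by omega)]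
      simp [List.drop_length]

-- under Pre_, A's distance is B's zip-fold (|x-y|² = (x-y)²)
theorem distance_eq (a b : List Int) (h : a.length ≤ b.length) :
    distance a b = some ((a.zip b).foldl (fun s p => s + (p.1 - p.2) ^ 2) 0) := by
  have := distAux a b h a.length 0 0 (by omega) (by omega)
  simpa [distance] using this

-- the break-loop counts to 1 iff some candidate root matches
theorem checkLoop_spec (a b : List Int) (l : List Int) (f : Int) :
    checkLoop a b l f = if (∃ i ∈ l, distance a b = some (i ^ 2)) then f + 1 else f := by
  induction l with
  | nil => simp [checkLoop]
  | cons i rest ih =>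
    by_cases hd : distance a b = some (i ^ 2)
    · simp [checkLoop, hd]
    · simp [checkLoop, hd, ih]

-- binary-search bracket invariant
theorem bsearch_spec (d : Int) :
    ∀ (fuel : Nat) (lo hi : Int), (hi - lo).toNat ≤ fuel → 0 ≤ lo → lo ≤ hi → hi ≤ 1000 →
    (∀ r : Int, 0 ≤ r → r < lo → r * r < d) → (hi < 1000 → d ≤ hi * hi) →
    ((bsearchFuel fuel d lo hi < 1000 ∧ bsearchFuel fuel d lo hi * bsearchFuel fuel d lo hi = d) ↔
      ∃ i : Int, 0 ≤ i ∧ i < 1000 ∧ i * i = d) := by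
  intro fuel
  induction fuel with
  | zero =>
    intro lo hi hfuel hlo hle hhi hbelow habove
    have heq : lo = hi := by omega
    subst heq
    simp only [bsearchFuel]
    constructor
    · rintro ⟨h1, h2⟩; exact ⟨lo, hlo, h1, h2⟩
    · rintro ⟨i, hi0, hi1, hi2⟩
      have hge : lo ≤ i := by
        by_contra hc
        exact absurd hi2 (ne_of_lt (hbelow i hi0 (by omega)))
      have hlt : lo < 1000 := by omega
      refine ⟨hlt, le_antisymm ?_ ?_⟩
      · calc lo * lo ≤ i * i := mul_le_mul hge hge hlo (by omega)
          _ = d := hi2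
      · exact habove hlt
  | succ n ihn =>
    intro lo hi hfuel hlo hle hhi hbelow habove
    simp only [bsearchFuel]
    by_cases hlt : lo < hi
    · simp only [if_pos hlt]
      have hmid := PySem.Int.floordiv_two_mid_bounds (lo := lo) (hi := hi) hle
      have hmidlt : PySem.Int.floordiv (lo + hi) 2 < hi := by
        rw [PySem.Int.floordiv_lt_iff_lt_mul (by omega)]; omega
      set mid := PySem.Int.floordiv (lo + hi) 2 with hmiddef
      by_cases hm : mid * mid < d
      · simp only [if_pos hm]
        refine ihn (mid + 1) hi (by omega) (by omega) (by omega) hhi ?_ habove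
        intro r hr0 hr
        have : r ≤ mid := by omega
        calc r * r ≤ mid * mid := mul_le_mul this this hr0 (by omega)
          _ < d := hm
      · simp only [if_neg hm]
        exact ihn lo mid (by omega) hlo (by omega) (by omega) hbelow (fun _ => by omega)
    · simp only [if_neg hlt]
      have heq : lo = hi := by omega
      subst heq
      constructor
      · rintro ⟨h1, h2⟩; exact ⟨lo, hlo, h1, h2⟩
      · rintro ⟨i, hi0, hi1, hi2⟩
        have hge : lo ≤ i := by
          by_contra hc
          exact absurd hi2 (ne_of_lt (hbelow i hi0 (by omega)))
        have hlt1000 : lo < 1000 := by omega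
        refine ⟨hlt1000, le_antisymm ?_ ?_⟩
        · calc lo * lo ≤ i * i := mul_le_mul hge hge hlo (by omega)
            _ = d := hi2
        · exact habove hlt1000

-- ===== VERDICT (by name: the statement is the Claim_ definition above) =====
theorem check_spec : Claim_equal_check := by
  intro a b _ hpre
  unfold Spec_check check check_alt
  have hd := distance_eq a b hpre
  set d := (a.zip b).foldl (fun s p => s + (p.1 - p.2) ^ 2) 0 with hddef
  rw [checkLoop_spec]
  have hiff := bsearch_spec d 1000 0 1000 (by norm_num) (by norm_num) (by norm_num) (by norm_num)
    (by intro r hr0 hr; omega) (by intro h; omega)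
  have hmem : (∃ i ∈ PySem.List.pyRange 0 1000 1, distance a b = some (i ^ 2)) ↔
      (∃ i : Int, 0 ≤ i ∧ i < 1000 ∧ i * i = d) := by
    constructor
    · rintro ⟨i, hmem, heq⟩
      rw [PySem.List.mem_pyRange_one] at hmem
      rw [hd] at heq
      refine ⟨i, hmem.1, hmem.2, ?_⟩
      have h3 : d = i ^ 2 := Option.some.inj heq
      rw [h3]; ring
    · rintro ⟨i, h0, h1, h2⟩
      refine ⟨i, PySem.List.mem_pyRange_one.mpr ⟨h0, h1⟩, ?_⟩
      rw [hd]
      congr 1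
      rw [← h2]; ring
  by_cases hex : ∃ i ∈ PySem.List.pyRange 0 1000 1, distance a b = some (i ^ 2)
  · rw [if_pos hex]
    have := hiff.mpr (hmem.mp hex)
    simp [this]
  · rw [if_neg hex]
    have : ¬ (bsearchFuel 1000 d 0 1000 < 1000 ∧ bsearchFuel 1000 d 0 1000 * bsearchFuel 1000 d 0 1000 = d) :=
      fun hc => hex (hmem.mpr (hiff.mp hc))
    simp [this]
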